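-- pv_equiv track=rewrite | github.com/iqrankhannwl/Python-Beyond-Basic | week-02/lecture-01/dillawar/find_sub_list.py | find_largest_sub_list
-- ===== SOURCE A (Python) =====
-- def find_largest_sub_list(given_list):
--     sub_list = []
--     sub_lists = []
--     for i in range(len(given_list)-1):
--         j = i+1
--         if given_list[i] != given_list[j]:
--             sub_list.append(given_list[i])
--         else:
--             sub_lists.append(sub_list)
--             sub_list=[]
--     return sub_lists
-- ===== SOURCE B (Python) =====
-- def find_largest_sub_list(given_list):
--     bounds = [i for i in range(len(given_list) - 1)
--               if given_list[i] == given_list[i + 1]]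
--     result = []
--     prev = -1
--     for b in bounds:
--         result.append(given_list[prev + 1:b])
--         prev = b
--     return result
-- ===== Notes on version B (the rewrite author's own statement) =====
-- stated objective: alternative
-- what changed: B first computes the list of adjacent-equal boundary indices, then emits each segment as an independent slice given_list[prev+1:b] between consecutive boundaries, instead of A's single pass that grows a mutable current sublist element by element and resets it at each boundary.
import Mathlib
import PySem

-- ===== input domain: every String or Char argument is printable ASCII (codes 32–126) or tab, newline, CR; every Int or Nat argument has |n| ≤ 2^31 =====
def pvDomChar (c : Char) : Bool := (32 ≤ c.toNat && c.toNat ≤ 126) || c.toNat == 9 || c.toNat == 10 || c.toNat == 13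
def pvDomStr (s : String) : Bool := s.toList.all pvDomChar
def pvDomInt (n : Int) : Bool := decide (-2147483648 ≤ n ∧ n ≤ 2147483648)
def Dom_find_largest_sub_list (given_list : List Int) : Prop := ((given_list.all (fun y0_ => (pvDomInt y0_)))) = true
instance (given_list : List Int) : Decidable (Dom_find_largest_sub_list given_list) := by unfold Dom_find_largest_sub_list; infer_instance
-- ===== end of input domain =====

-- B replaces A's element-by-element accumulation with a boundary-index pass plus slicing (alternative decomposition, same cost); return value only, no mutation.
-- ===== PORT A =====
-- loop body of A's for-loop; indices i and j = i+1 lie in [0, len-1], always in range, so pyGetD is exact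
def pvStepA (l : List Int) (st : List Int × List (List Int)) (i : Int) : List Int × List (List Int) :=
  let j := i + 1
  if PySem.List.pyGetD l i 0 ≠ PySem.List.pyGetD l j 0 then
    (st.1 ++ [PySem.List.pyGetD l i 0], st.2)
  else
    ([], st.2 ++ [st.1])

def find_largest_sub_list (given_list : List Int) : List (List Int) :=
  ((PySem.List.pyRange 0 (PySem.List.len given_list - 1) 1).foldl
      (pvStepA given_list) ([], [])).2

-- ===== PORT B =====
-- bounds = [i for i in range(len(l)-1) if l[i] == l[i+1]]  (indices in range, so pyGetD is exact)
def pvBounds (l : List Int) : List Int :=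
  (PySem.List.pyRange 0 (PySem.List.len l - 1) 1).filter
    (fun i => PySem.List.pyGetD l i 0 == PySem.List.pyGetD l (i + 1) 0)

-- loop body of B: append the slice l[prev+1:b] and move the cursor to b
def pvStepB (l : List Int) (st : Int × List (List Int)) (b : Int) : Int × List (List Int) :=
  (b, st.2 ++ [PySem.List.slice l (some (st.1 + 1)) (some b)])

def find_largest_sub_list_alt (given_list : List Int) : List (List Int) :=
  ((pvBounds given_list).foldl (pvStepB given_list) (-1, [])).2

-- ===== PRECONDITION & SPEC =====
def Spec_find_largest_sub_list (given_list : List Int) (out : List (List Int)) : Prop := out = find_largest_sub_list_alt given_list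
instance (given_list : List Int) (out : List (List Int)) : Decidable (Spec_find_largest_sub_list given_list out) := by unfold Spec_find_largest_sub_list; infer_instance

-- ===== CLAIM (what is proved, stated in full; the proofs are below) =====
def Claim_equal_find_largest_sub_list : Prop := ∀ (given_list : List Int), Dom_find_largest_sub_list given_list → Spec_find_largest_sub_list given_list (find_largest_sub_list given_list)

-- ===== LEMMAS AND PROOFS =====

-- ===== VERDICT (by name: the statement is the Claim_ definition above) =====
-- Invariant: after processing indices < m, A's current sublist is the elements of l
-- strictly between the last boundary (prev-1, with prev-1 = -1 initially) and m,
-- i.e. (l.drop prev).take (m - prev), while B's cursor is prev - 1.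
theorem loop_eq (l : List Int) (k : Nat) : ∀ (m prev : Nat) (acc : List (List Int)),
    prev ≤ m → m + k + 1 = l.length →
    ((PySem.List.pyRange (m : Int) ((l.length : Int) - 1) 1).foldl (pvStepA l)
        ((l.drop prev).take (m - prev), acc)).2
  = (((PySem.List.pyRange (m : Int) ((l.length : Int) - 1) 1).filter
        (fun i => PySem.List.pyGetD l i 0 == PySem.List.pyGetD l (i + 1) 0)).foldl (pvStepB l)
        ((prev : Int) - 1, acc)).2 := by
  induction k with
  | zero =>
    intro m prev acc hpm hlen
    rw [PySem.List.pyRange_one_eq_nil (by omega)]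
    simp
  | succ k ih =>
    intro m prev acc hpm hlen
    have hm : m < l.length := by omega
    rw [PySem.List.pyRange_one_cons (by omega), List.filter_cons, List.foldl_cons]
    by_cases h : PySem.List.pyGetD l (m : Int) 0 = PySem.List.pyGetD l ((m : Int) + 1) 0
    · -- boundary at m: A resets its current sublist, B emits the slice l[prev:m]
      have hA : pvStepA l ((l.drop prev).take (m - prev), acc) (m : Int)
          = ([], acc ++ [(l.drop prev).take (m - prev)]) := by
        simp only [pvStepA]
        rw [if_neg (fun hn => hn h)]
      have hcond : (PySem.List.pyGetD l (m : Int) 0 == PySem.List.pyGetD l ((m : Int) + 1) 0) = true := by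
        simpa using h
      have hB : pvStepB l ((prev : Int) - 1, acc) (m : Int)
          = ((m : Int), acc ++ [(l.drop prev).take (m - prev)]) := by
        simp only [pvStepB]
        rw [show ((prev : Int) - 1) + 1 = ((prev : Nat) : Int) by ring, PySem.List.slice_natCast]
      rw [hA, hcond, if_pos rfl, List.foldl_cons, hB]
      have h2 := ih (m + 1) (m + 1) (acc ++ [(l.drop prev).take (m - prev)]) le_rfl (by omega)
      rw [Nat.sub_self, List.take_zero] at h2
      push_cast at h2
      rw [show ((m : Int) + 1 - 1) = (m : Int) by ring] at h2
      exact h2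
    · -- no boundary: A extends its current sublist with l[m], B skips index m
      have hext : (l.drop prev).take (m - prev) ++ [PySem.List.pyGetD l (m : Int) 0]
          = (l.drop prev).take (m + 1 - prev) := by
        rw [show m + 1 - prev = (m - prev) + 1 by omega, List.take_add_one]
        congr 1
        rw [List.getElem?_drop, show prev + (m - prev) = m by omega,
          List.getElem?_eq_getElem hm]
        simp [PySem.List.pyGetD_natCast, List.getD_eq_getElem?_getD,
          List.getElem?_eq_getElem hm]
      have hA : pvStepA l ((l.drop prev).take (m - prev), acc) (m : Int)
          = ((l.drop prev).take (m + 1 - prev), acc) := by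
        simp only [pvStepA]
        rw [if_pos h, hext]
      have hcond : (PySem.List.pyGetD l (m : Int) 0 == PySem.List.pyGetD l ((m : Int) + 1) 0) = false := by
        simpa using h
      rw [hA, hcond, if_neg (by simp)]
      have h2 := ih (m + 1) prev acc (by omega) (by omega)
      push_cast at h2
      exact h2

theorem find_largest_sub_list_spec : Claim_equal_find_largest_sub_list := by
  intro l _
  unfold Spec_find_largest_sub_list find_largest_sub_list find_largest_sub_list_alt pvBounds
  rcases Nat.eq_zero_or_pos l.length with h0 | hpos
  · rw [PySem.List.len_eq, PySem.List.pyRange_one_eq_nil (by omega)]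
    simp
  · rw [PySem.List.len_eq]
    have := loop_eq l (l.length - 1) 0 0 [] (le_refl 0) (by omega)
    simpa using this
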